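-- pv_equiv track=rewrite | github.com/SSAFY-while-true/se0hyun | 202503/202503_4/Programmers150368.py | make_disc_list
-- ===== SOURCE A (Python) =====
-- def make_disc_list(emoticons):
--     rates = [10, 20, 30, 40]
--     discounts = []
--
--     for mask in range(4 ** len(emoticons)):
--         combos = []
--         for i in range(len(emoticons)):
--             rate_idx = (mask >> (i * 2)) & 0b11
--             combos.append(rates[rate_idx])
--         discounts.append(combos)
--
--     return discounts
-- ===== SOURCE B (Python) =====
-- def make_disc_list(emoticons):
--     # Build combinations incrementally: position k's rate is chosen at step k,
--     # with rate as the outer loop so earlier positions vary fastest (matching mask order).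
--     result = [[]]
--     for _ in emoticons:
--         result = [combo + [rate] for rate in (10, 20, 30, 40) for combo in result]
--     return result
-- ===== Notes on version B (the rewrite author's own statement) =====
-- stated objective: simpler
-- what changed: B builds the combination list incrementally (result = [combo + [rate] for rate in rates for combo in result], once per emoticon) instead of enumerating 4^n bit-masks and decoding two bits per position.
import Mathlib
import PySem

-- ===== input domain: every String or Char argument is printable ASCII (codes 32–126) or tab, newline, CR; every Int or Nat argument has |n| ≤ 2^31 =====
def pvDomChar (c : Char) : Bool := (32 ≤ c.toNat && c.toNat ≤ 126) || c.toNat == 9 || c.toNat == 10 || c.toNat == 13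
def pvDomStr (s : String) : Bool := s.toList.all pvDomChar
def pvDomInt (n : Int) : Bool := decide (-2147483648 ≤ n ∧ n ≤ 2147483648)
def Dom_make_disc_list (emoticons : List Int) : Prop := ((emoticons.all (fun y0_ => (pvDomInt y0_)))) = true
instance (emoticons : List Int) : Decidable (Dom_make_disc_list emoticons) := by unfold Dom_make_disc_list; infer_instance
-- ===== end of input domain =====

-- B builds the 4^n combinations incrementally (one position per emoticon) instead of
-- decoding a bit-mask per combination; objective: simpler (no faster: same output size dominates).

-- ===== PORT A =====
-- Port of A: enumerate masks 0..4^n-1, decode two bits per position.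
-- `mask >> (i*2)`: i ≥ 0 always (it comes from range(len)), so `.toNat` is exact;
-- `rates[rate_idx]`: rate_idx = mask>>… & 3 is always in 0..3, so the lookup never raises
-- and the `.getD 0` default is never used.
def make_disc_list (emoticons : List Int) : List (List Int) :=
  let rates : List Int := [10, 20, 30, 40]
  (PySem.List.pyRange 0 ((4 : Int) ^ emoticons.length) 1).foldl
    (fun discounts mask =>
      discounts ++
        [(PySem.List.pyRange 0 (emoticons.length : Int) 1).foldl
          (fun combos i =>
            combos ++ [PySem.List.pyGetD rates (PySem.Int.band (mask >>> (i * 2).toNat) 3) 0])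
          []])
    []

-- ===== PORT B =====
-- Port of B: result = [combo + [rate] for rate in rates for combo in result], once per emoticon.
def make_disc_list_alt (emoticons : List Int) : List (List Int) :=
  emoticons.foldl
    (fun result _ =>
      ([10, 20, 30, 40] : List Int).flatMap (fun rate => result.map (fun combo => combo ++ [rate])))
    [[]]

-- ===== PRECONDITION & SPEC =====
def Spec_make_disc_list (emoticons : List Int) (out : List (List Int)) : Prop := out = make_disc_list_alt emoticons
instance (emoticons : List Int) (out : List (List Int)) : Decidable (Spec_make_disc_list emoticons out) := by unfold Spec_make_disc_list; infer_instance

-- ===== CLAIM (what is proved, stated in full; the proofs are below) =====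
def Claim_equal_make_disc_list : Prop := ∀ (emoticons : List Int), Dom_make_disc_list emoticons → Spec_make_disc_list emoticons (make_disc_list emoticons)

-- ===== LEMMAS AND PROOFS =====

-- the rate chosen for base-4 digit d
def rateOf (d : Nat) : Int := ([10, 20, 30, 40] : List Int).getD d 0

-- the combination A produces for mask m with n emoticons (digit i = m / 4^i % 4)
def rowOf (m n : Nat) : List Int := (List.range n).map (fun i => rateOf (m / 4 ^ i % 4))

-- B's one step per emoticon
def stepB (result : List (List Int)) : List (List Int) :=
  ([10, 20, 30, 40] : List Int).flatMap (fun rate => result.map (fun combo => combo ++ [rate]))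

theorem decode_digit (m k : Nat) :
    PySem.List.pyGetD ([10, 20, 30, 40] : List Int)
        (PySem.Int.band ((m : Int) >>> (((k : Nat) : Int) * 2).toNat) 3) 0 =
      rateOf (m / 4 ^ k % 4) := by
  have h1 : (((k : Nat) : Int) * 2).toNat = k * 2 := by omega
  have h2 : (m : Int) >>> (k * 2) = ((m >>> (k * 2) : Nat) : Int) := by simp
  have h3 : ((3 : Int)) = ((3 : Nat) : Int) := by norm_num
  rw [h1, h2, h3, PySem.Int.band_natCast, PySem.List.pyGetD_natCast]
  have h4 : m >>> (k * 2) &&& 3 = m / 4 ^ k % 4 := by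
    have := Nat.and_two_pow_sub_one_eq_mod (m >>> (k * 2)) 2
    norm_num at this
    rw [this, Nat.shiftRight_eq_div_pow]
    congr 1
    rw [mul_comm, pow_mul]
    norm_num
  rw [h4, rateOf]

theorem portA_eq_rows (emoticons : List Int) :
    make_disc_list emoticons =
      (List.range (4 ^ emoticons.length)).map (fun m => rowOf m emoticons.length) := by
  unfold make_disc_list
  rw [PySem.List.foldl_append_singleton_eq_map, List.nil_append]
  have hc : ((4 : Int) ^ emoticons.length) = ((4 ^ emoticons.length : Nat) : Int) := by push_cast; rfl
  rw [hc, PySem.List.pyRange_zero_nat (4 ^ emoticons.length), List.map_map]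
  refine List.map_congr_left (fun m _ => ?_)
  simp only [Function.comp]
  rw [PySem.List.foldl_append_singleton_eq_map, List.nil_append,
      PySem.List.pyRange_zero_nat emoticons.length, List.map_map]
  refine List.map_congr_left (fun k _ => ?_)
  simpa using decode_digit m k

theorem foldl_const_iterate {α β : Type} (f : β → β) (l : List α) (init : β) :
    l.foldl (fun b _ => f b) init = f^[l.length] init := by
  induction l generalizing init with
  | nil => rfl
  | cons x xs ih => simp [List.foldl_cons, ih, Function.iterate_succ_apply]

theorem portB_eq_iter (emoticons : List Int) :
    make_disc_list_alt emoticons = stepB^[emoticons.length] [[]] := by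
  exact foldl_const_iterate stepB emoticons [[]]

theorem range_four_pow_succ (n : Nat) :
    List.range (4 ^ (n + 1)) =
      (List.range 4).flatMap (fun r => (List.range (4 ^ n)).map (fun m => r * 4 ^ n + m)) := by
  have h : 4 ^ (n + 1) = 4 ^ n + (4 ^ n + (4 ^ n + 4 ^ n)) := by ring
  have h4 : List.range 4 = [0, 1, 2, 3] := by rfl
  rw [h, List.range_add, List.range_add, List.range_add, h4]
  simp [List.map_map, Function.comp_def]
  congr 1
  · exact List.map_congr_left (fun a _ => by omega)
  · exact List.map_congr_left (fun a _ => by omega)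

theorem digit_low (r m n i : Nat) (_hm : m < 4 ^ n) (hi : i < n) :
    (r * 4 ^ n + m) / 4 ^ i % 4 = m / 4 ^ i % 4 := by
  have hsplit : r * 4 ^ n + m = m + (r * 4 ^ (n - i - 1) * 4) * 4 ^ i := by
    have : 4 ^ n = 4 ^ (n - i - 1) * 4 * 4 ^ i := by
      rw [mul_assoc, ← pow_succ', ← pow_add]
      congr 1
      omega
    rw [this]; ring
  rw [hsplit, Nat.add_mul_div_right _ _ (by positivity), Nat.add_mul_mod_self_right]

theorem digit_high (r m n : Nat) (hm : m < 4 ^ n) (hr : r < 4) :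
    (r * 4 ^ n + m) / 4 ^ n % 4 = r := by
  rw [add_comm, Nat.add_mul_div_right _ _ (by positivity), Nat.div_eq_of_lt hm]
  omega

theorem rowOf_split (r m n : Nat) (hm : m < 4 ^ n) (hr : r < 4) :
    rowOf (r * 4 ^ n + m) (n + 1) = rowOf m n ++ [rateOf r] := by
  unfold rowOf
  rw [List.range_succ, List.map_append, List.map_singleton, digit_high r m n hm hr]
  congr 1
  exact List.map_congr_left (fun i hi => by rw [digit_low r m n i hm (List.mem_range.mp hi)])

theorem rows_eq_iter (n : Nat) :
    (List.range (4 ^ n)).map (fun m => rowOf m n) = stepB^[n] [[]] := by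
  induction n with
  | zero => simp [rowOf]
  | succ n ih =>
    rw [Function.iterate_succ_apply', ← ih, range_four_pow_succ, List.map_flatMap]
    have hrates : ([10, 20, 30, 40] : List Int) = (List.range 4).map rateOf := by rfl
    unfold stepB
    rw [hrates, List.flatMap_map]
    rw [List.flatMap_def, List.flatMap_def]
    congr 1
    refine List.map_congr_left (fun r hr => ?_)
    rw [List.map_map, List.map_map]
    refine List.map_congr_left (fun m hm => ?_)
    simp only [Function.comp]
    exact rowOf_split r m n (List.mem_range.mp hm) (List.mem_range.mp hr)

-- ===== VERDICT (by name: the statement is the Claim_ definition above) =====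
theorem make_disc_list_spec : Claim_equal_make_disc_list := by
  intro emoticons _
  unfold Spec_make_disc_list
  rw [portA_eq_rows, portB_eq_iter, rows_eq_iter]
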